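-- pv_equiv track=rewrite | github.com/Nivaan0803/App-Project- | pages/calendar.py | shift_month
-- ===== SOURCE A (Python) =====
-- def shift_month(year: int, month: int, delta: int) -> tuple[int, int]:
--     moved_month = month + delta
--     moved_year = year
--     while moved_month < 1:
--         moved_month += 12
--         moved_year -= 1
--     while moved_month > 12:
--         moved_month -= 12
--         moved_year += 1
--     return moved_year, moved_month
-- ===== SOURCE B (Python) =====
-- def shift_month(year: int, month: int, delta: int) -> tuple[int, int]:
--     q, m = divmod(month - 1 + delta, 12)
--     return year + q, m + 1
-- ===== Notes on version B (the rewrite author's own statement) =====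
-- stated objective: faster
-- what changed: Replaced the two normalization while-loops with a single divmod closed form on month-1+delta.
import Mathlib
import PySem

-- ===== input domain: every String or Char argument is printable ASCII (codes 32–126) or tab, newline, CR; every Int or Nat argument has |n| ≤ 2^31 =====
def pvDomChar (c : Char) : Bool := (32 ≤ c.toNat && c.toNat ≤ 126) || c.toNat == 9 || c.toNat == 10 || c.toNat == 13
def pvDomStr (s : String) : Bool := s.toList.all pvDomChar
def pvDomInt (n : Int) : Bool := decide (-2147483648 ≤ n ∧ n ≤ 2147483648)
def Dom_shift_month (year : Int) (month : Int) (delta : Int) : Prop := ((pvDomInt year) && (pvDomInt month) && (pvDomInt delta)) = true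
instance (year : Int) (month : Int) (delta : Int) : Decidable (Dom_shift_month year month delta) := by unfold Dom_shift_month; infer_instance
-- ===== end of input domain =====

-- B replaces A's two normalization while-loops with one divmod closed form (idiomatic).


-- ===== PORT A =====
-- while moved_month < 1: moved_month += 12; moved_year -= 1
def pvLoopUpA (m y : Int) : Int × Int :=
  if m < 1 then pvLoopUpA (m + 12) (y - 1) else (m, y)
termination_by (1 - m).toNat
decreasing_by omega

-- while moved_month > 12: moved_month -= 12; moved_year += 1
def pvLoopDownA (m y : Int) : Int × Int :=
  if m > 12 then pvLoopDownA (m - 12) (y + 1) else (m, y)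
termination_by (m - 12).toNat
decreasing_by omega

def shift_month (year : Int) (month : Int) (delta : Int) : Int × Int :=
  let p := pvLoopUpA (month + delta) year
  let q := pvLoopDownA p.1 p.2
  (q.2, q.1)

-- ===== PORT B =====
def shift_month_alt (year : Int) (month : Int) (delta : Int) : Int × Int :=
  match PySem.Int.divmod? (month - 1 + delta) 12 with
  | some (q, m) => (year + q, m + 1)
  | none => (year, month)  -- unreachable: divisor 12 ≠ 0

-- ===== PRECONDITION & SPEC =====
def Spec_shift_month (year : Int) (month : Int) (delta : Int) (out : Int × Int) : Prop := out = shift_month_alt year month delta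
instance (year : Int) (month : Int) (delta : Int) (out : Int × Int) : Decidable (Spec_shift_month year month delta out) := by unfold Spec_shift_month; infer_instance

-- ===== CLAIM (what is proved, stated in full; the proofs are below) =====
def Claim_equal_shift_month : Prop := ∀ (year : Int) (month : Int) (delta : Int), Dom_shift_month year month delta → Spec_shift_month year month delta (shift_month year month delta)

-- ===== LEMMAS AND PROOFS =====

theorem pvLoopUpA_of_ge (m y : Int) (h : 1 ≤ m) : pvLoopUpA m y = (m, y) := by
  rw [pvLoopUpA]; simp [show ¬ m < 1 by omega]

theorem pvLoopDownA_of_le (m y : Int) (h : m ≤ 12) : pvLoopDownA m y = (m, y) := by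
  rw [pvLoopDownA]; simp [show ¬ m > 12 by omega]

-- normal form of the first loop when it runs: result is ((m-1) % 12 + 1, y + (m-1) / 12)
theorem pvLoopUpA_eq (m y : Int) (h : m < 1) :
    pvLoopUpA m y = ((m - 1) % 12 + 1, y + (m - 1) / 12) := by
  rw [pvLoopUpA]
  simp only [if_pos h]
  by_cases h2 : m + 12 < 1
  · rw [pvLoopUpA_eq (m + 12) (y - 1) h2]
    simp only [Prod.mk.injEq]; constructor <;> omega
  · rw [pvLoopUpA_of_ge (m + 12) (y - 1) (by omega)]
    simp only [Prod.mk.injEq]; constructor <;> omega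
termination_by (1 - m).toNat
decreasing_by omega

theorem pvLoopDownA_eq (m y : Int) (h : m > 12) :
    pvLoopDownA m y = ((m - 1) % 12 + 1, y + (m - 1) / 12) := by
  rw [pvLoopDownA]
  simp only [if_pos h]
  by_cases h2 : m - 12 > 12
  · rw [pvLoopDownA_eq (m - 12) (y + 1) h2]
    simp only [Prod.mk.injEq]; constructor <;> omega
  · rw [pvLoopDownA_of_le (m - 12) (y + 1) (by omega)]
    simp only [Prod.mk.injEq]; constructor <;> omega
termination_by (m - 12).toNat
decreasing_by omega

theorem shift_month_closed (year month delta : Int) :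
    shift_month year month delta
      = (year + (month + delta - 1) / 12, (month + delta - 1) % 12 + 1) := by
  unfold shift_month
  by_cases h1 : month + delta < 1
  · rw [pvLoopUpA_eq _ _ h1]
    dsimp only
    rw [pvLoopDownA_of_le _ _ (by omega)]
  · rw [pvLoopUpA_of_ge _ _ (by omega)]
    dsimp only
    by_cases h2 : month + delta > 12
    · rw [pvLoopDownA_eq _ _ h2]
    · rw [pvLoopDownA_of_le _ _ (by omega)]
      simp only [Prod.mk.injEq]; constructor <;> omega

-- ===== VERDICT (by name: the statement is the Claim_ definition above) =====
theorem shift_month_spec : Claim_equal_shift_month := by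
  intro year month delta _
  unfold Spec_shift_month shift_month_alt
  rw [shift_month_closed]
  simp [PySem.Int.divmod?, Int.fdiv_eq_ediv_of_nonneg, Int.fmod_eq_emod, Prod.ext_iff]
  constructor <;> omega
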